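-- pv_equiv track=rewrite | github.com/fxregimelab/fx-regime-lab | pipeline/src/fetchers/macro_calendar.py | _match_forexfactory_event
-- ===== SOURCE A (Python) =====
-- def _match_forexfactory_event(country: str, title: str) -> str | None:
--     """Map FF ``country`` + ``title`` to a canonical impact-map key, or None."""
--     c = country.strip().upper()
--     t = title.strip().lower()
--
--     if c == "USD":
--         if "fomc" in t or ("federal funds" in t and "rate" in t):
--             return "FOMC Rate Decision"
--         if "non-farm" in t or "nonfarm" in t or "non farm" in t:
--             return "US Non-Farm Payrolls"
--         if "cpi" in t or "consumer price" in t: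
--             return "US CPI YoY"
--         if "employment cost index" in t:
--             return None
--         if "gdp" in t or "gross domestic product" in t:
--             return "US GDP Advance"
--         if "pce" in t and "price" in t:
--             return "US PCE Deflator"
--         if "unemployment" in t and "rate" in t:
--             return "US Unemployment Rate"
--         if "producer price" in t or " ppi" in t or t.startswith("ppi"):
--             return "US PPI MoM"
--         if "industrial production" in t:
--             return "US Industrial Production"
--         return None
--
--     if c == "EUR":
--         if "ecb" in t:
--             if any(k in t for k in ("rate", "interest", "deposit", "refinancing", "monetary")):
--                 return "ECB Rate Decision"
--         return None
--
--     if c in ("GBP", "UK"):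
--         if "boe" in t or "bank of england" in t:
--             if any(k in t for k in ("rate", "interest", "bank", "monetary", "mpc")):
--                 return "BoE Rate Decision"
--         return None
--
--     if c == "AUD":
--         if "rba" in t or "reserve bank of australia" in t:
--             if any(k in t for k in ("rate", "interest", "cash rate", "monetary")):
--                 return "RBA Rate Decision"
--         return None
--
--     if c == "CAD":
--         if "boc" in t or "bank of canada" in t:
--             if any(k in t for k in ("rate", "interest", "overnight", "monetary")):
--                 return "BoC Rate Decision"
--         return None
--
--     if c == "CHF":
--         if "snb" in t or "swiss national bank" in t:
--             if any(k in t for k in ("rate", "interest", "monetary")):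
--                 return "SNB Rate Decision"
--         return None
--
--     if c == "JPY":
--         if "boj" in t or "bank of japan" in t:
--             return "BoJ Rate Decision"
--         return None
--
--     if c == "INR" or c == "IN":
--         if "rbi" in t:
--             return "RBI MPC Decision"
--         return None
--
--     if "rbi" in t and "rate" in t:
--         return "RBI MPC Decision"
--
--     return None
-- ===== SOURCE B (Python) =====
-- # Table-driven re-implementation: per-country ordered rule lists instead of an if-chain.
-- # A pattern is a substring test, or a prefix test when written with a leading "^".
-- # A rule fires when every group has at least one matching pattern; the first firing
-- # rule's result (which may be None) is returned.
--
-- _RULES = {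
--     "USD": [
--         ((("fomc",),), "FOMC Rate Decision"),
--         ((("federal funds",), ("rate",)), "FOMC Rate Decision"),
--         ((("non-farm", "nonfarm", "non farm"),), "US Non-Farm Payrolls"),
--         ((("cpi", "consumer price"),), "US CPI YoY"),
--         ((("employment cost index",),), None),
--         ((("gdp", "gross domestic product"),), "US GDP Advance"),
--         ((("pce",), ("price",)), "US PCE Deflator"),
--         ((("unemployment",), ("rate",)), "US Unemployment Rate"),
--         ((("producer price", " ppi", "^ppi"),), "US PPI MoM"),
--         ((("industrial production",),), "US Industrial Production"),
--     ],
--     "EUR": [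
--         ((("ecb",), ("rate", "interest", "deposit", "refinancing", "monetary")),
--          "ECB Rate Decision"),
--     ],
--     "GBP": [
--         ((("boe", "bank of england"), ("rate", "interest", "bank", "monetary", "mpc")),
--          "BoE Rate Decision"),
--     ],
--     "AUD": [
--         ((("rba", "reserve bank of australia"), ("rate", "interest", "cash rate", "monetary")),
--          "RBA Rate Decision"),
--     ],
--     "CAD": [
--         ((("boc", "bank of canada"), ("rate", "interest", "overnight", "monetary")),
--          "BoC Rate Decision"),
--     ],
--     "CHF": [
--         ((("snb", "swiss national bank"), ("rate", "interest", "monetary")),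
--          "SNB Rate Decision"),
--     ],
--     "JPY": [
--         ((("boj", "bank of japan"),), "BoJ Rate Decision"),
--     ],
--     "INR": [
--         ((("rbi",),), "RBI MPC Decision"),
--     ],
-- }
-- _RULES["UK"] = _RULES["GBP"]
-- _RULES["IN"] = _RULES["INR"]
--
-- # Countries without their own rule list fall back to the generic RBI rule.
-- _FALLBACK = [((("rbi",), ("rate",)), "RBI MPC Decision")]
--
--
-- def _hit(t: str, p: str) -> bool:
--     return t.startswith(p[1:]) if p.startswith("^") else p in t
--
--
-- def _match_forexfactory_event(country: str, title: str) -> str | None: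
--     t = title.strip().lower()
--     for groups, result in _RULES.get(country.strip().upper(), _FALLBACK):
--         if all(any(_hit(t, p) for p in g) for g in groups):
--             return result
--     return None
-- ===== Notes on version B (the rewrite author's own statement) =====
-- stated objective: simpler
-- what changed: Replaces the hand-written per-country if/elif chain by a declarative table mapping each country to an ordered list of (pattern-groups, result) rules, dispatched through one generic first-match scanner with a tiny substring/prefix pattern matcher.
import Mathlib
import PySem

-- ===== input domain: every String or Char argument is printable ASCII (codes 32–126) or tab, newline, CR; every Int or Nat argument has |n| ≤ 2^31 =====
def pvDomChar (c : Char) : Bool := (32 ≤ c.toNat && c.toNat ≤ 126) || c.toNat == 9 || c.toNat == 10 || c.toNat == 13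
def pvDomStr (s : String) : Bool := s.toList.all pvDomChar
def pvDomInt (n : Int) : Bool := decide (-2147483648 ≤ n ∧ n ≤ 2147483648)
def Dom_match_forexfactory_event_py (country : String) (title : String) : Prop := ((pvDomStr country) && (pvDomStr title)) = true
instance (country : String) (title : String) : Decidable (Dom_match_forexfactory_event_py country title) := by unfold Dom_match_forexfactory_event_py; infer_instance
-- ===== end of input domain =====

-- B replaces A's country if-chain by a per-country table of (pattern groups, result) rules
-- dispatched through one generic first-match scanner (objective: simpler/table-driven).

-- ===== PORT A =====
-- body of _match_forexfactory_event after c/t are computed, step for step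
def pvCoreA (c t : String) : Option String :=
  if c = "USD" then
    if PySem.Str.isIn "fomc" t || (PySem.Str.isIn "federal funds" t && PySem.Str.isIn "rate" t) then some "FOMC Rate Decision"
    else if PySem.Str.isIn "non-farm" t || PySem.Str.isIn "nonfarm" t || PySem.Str.isIn "non farm" t then some "US Non-Farm Payrolls"
    else if PySem.Str.isIn "cpi" t || PySem.Str.isIn "consumer price" t then some "US CPI YoY"
    else if PySem.Str.isIn "employment cost index" t then none
    else if PySem.Str.isIn "gdp" t || PySem.Str.isIn "gross domestic product" t then some "US GDP Advance"
    else if PySem.Str.isIn "pce" t && PySem.Str.isIn "price" t then some "US PCE Deflator"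
    else if PySem.Str.isIn "unemployment" t && PySem.Str.isIn "rate" t then some "US Unemployment Rate"
    else if PySem.Str.isIn "producer price" t || PySem.Str.isIn " ppi" t || PySem.Str.startswith t "ppi" then some "US PPI MoM"
    else if PySem.Str.isIn "industrial production" t then some "US Industrial Production"
    else none
  else if c = "EUR" then
    if PySem.Str.isIn "ecb" t then
      if (["rate", "interest", "deposit", "refinancing", "monetary"].any fun k => PySem.Str.isIn k t) then some "ECB Rate Decision"
      else none
    else none
  else if c = "GBP" ∨ c = "UK" then
    if PySem.Str.isIn "boe" t || PySem.Str.isIn "bank of england" t then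
      if (["rate", "interest", "bank", "monetary", "mpc"].any fun k => PySem.Str.isIn k t) then some "BoE Rate Decision"
      else none
    else none
  else if c = "AUD" then
    if PySem.Str.isIn "rba" t || PySem.Str.isIn "reserve bank of australia" t then
      if (["rate", "interest", "cash rate", "monetary"].any fun k => PySem.Str.isIn k t) then some "RBA Rate Decision"
      else none
    else none
  else if c = "CAD" then
    if PySem.Str.isIn "boc" t || PySem.Str.isIn "bank of canada" t then
      if (["rate", "interest", "overnight", "monetary"].any fun k => PySem.Str.isIn k t) then some "BoC Rate Decision"
      else none
    else none
  else if c = "CHF" then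
    if PySem.Str.isIn "snb" t || PySem.Str.isIn "swiss national bank" t then
      if (["rate", "interest", "monetary"].any fun k => PySem.Str.isIn k t) then some "SNB Rate Decision"
      else none
    else none
  else if c = "JPY" then
    if PySem.Str.isIn "boj" t || PySem.Str.isIn "bank of japan" t then some "BoJ Rate Decision"
    else none
  else if c = "INR" ∨ c = "IN" then
    if PySem.Str.isIn "rbi" t then some "RBI MPC Decision"
    else none
  else if PySem.Str.isIn "rbi" t && PySem.Str.isIn "rate" t then some "RBI MPC Decision"
  else none

def match_forexfactory_event_py (country : String) (title : String) : Option String :=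
  pvCoreA (PySem.Str.upper (PySem.Str.strip country)) (PySem.Str.lower (PySem.Str.strip title))

-- ===== PORT B =====
-- _hit: a pattern starting with "^" is a prefix test, otherwise a substring test
def pvHit (t p : String) : Bool :=
  if PySem.Str.startswith p "^" then PySem.Str.startswith t (PySem.Str.slice p (some 1) none)
  else PySem.Str.isIn p t

-- the all/any of B's rule test
def pvRuleHolds (t : String) (groups : List (List String)) : Bool :=
  groups.all fun g => g.any fun p => pvHit t p

-- B's for-loop: return the first rule whose groups all hit
def pvFirstMatch (t : String) : List (List (List String) × Option String) → Option String
  | [] => none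
  | (gs, res) :: rest => if pvRuleHolds t gs then res else pvFirstMatch t rest

def pvUsdRules : List (List (List String) × Option String) :=
  [ ([["fomc"]], some "FOMC Rate Decision"),
    ([["federal funds"], ["rate"]], some "FOMC Rate Decision"),
    ([["non-farm", "nonfarm", "non farm"]], some "US Non-Farm Payrolls"),
    ([["cpi", "consumer price"]], some "US CPI YoY"),
    ([["employment cost index"]], none),
    ([["gdp", "gross domestic product"]], some "US GDP Advance"),
    ([["pce"], ["price"]], some "US PCE Deflator"),
    ([["unemployment"], ["rate"]], some "US Unemployment Rate"),
    ([["producer price", " ppi", "^ppi"]], some "US PPI MoM"),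
    ([["industrial production"]], some "US Industrial Production") ]

def pvEurRules : List (List (List String) × Option String) :=
  [ ([["ecb"], ["rate", "interest", "deposit", "refinancing", "monetary"]], some "ECB Rate Decision") ]

def pvGbpRules : List (List (List String) × Option String) :=
  [ ([["boe", "bank of england"], ["rate", "interest", "bank", "monetary", "mpc"]], some "BoE Rate Decision") ]

def pvAudRules : List (List (List String) × Option String) :=
  [ ([["rba", "reserve bank of australia"], ["rate", "interest", "cash rate", "monetary"]], some "RBA Rate Decision") ]

def pvCadRules : List (List (List String) × Option String) :=
  [ ([["boc", "bank of canada"], ["rate", "interest", "overnight", "monetary"]], some "BoC Rate Decision") ]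

def pvChfRules : List (List (List String) × Option String) :=
  [ ([["snb", "swiss national bank"], ["rate", "interest", "monetary"]], some "SNB Rate Decision") ]

def pvJpyRules : List (List (List String) × Option String) :=
  [ ([["boj", "bank of japan"]], some "BoJ Rate Decision") ]

def pvInrRules : List (List (List String) × Option String) :=
  [ ([["rbi"]], some "RBI MPC Decision") ]

-- _RULES, in Python insertion order (UK/IN aliases appended)
def pvRules : PySem.Dict String (List (List (List String) × Option String)) :=
  PySem.Dict.mk
    [ ("USD", pvUsdRules), ("EUR", pvEurRules), ("GBP", pvGbpRules), ("AUD", pvAudRules),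
      ("CAD", pvCadRules), ("CHF", pvChfRules), ("JPY", pvJpyRules), ("INR", pvInrRules),
      ("UK", pvGbpRules), ("IN", pvInrRules) ]

def pvFallback : List (List (List String) × Option String) :=
  [ ([["rbi"], ["rate"]], some "RBI MPC Decision") ]

def match_forexfactory_event_py_alt (country : String) (title : String) : Option String :=
  let t := PySem.Str.lower (PySem.Str.strip title)
  pvFirstMatch t (PySem.Dict.getD pvRules (PySem.Str.upper (PySem.Str.strip country)) pvFallback)

-- ===== PRECONDITION & SPEC =====
def Spec_match_forexfactory_event_py (country : String) (title : String) (out : Option String) : Prop := out = match_forexfactory_event_py_alt country title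
instance (country : String) (title : String) (out : Option String) : Decidable (Spec_match_forexfactory_event_py country title out) := by unfold Spec_match_forexfactory_event_py; infer_instance

-- ===== CLAIM (what is proved, stated in full; the proofs are below) =====
def Claim_equal_match_forexfactory_event_py : Prop := ∀ (country : String) (title : String), Dom_match_forexfactory_event_py country title → Spec_match_forexfactory_event_py country title (match_forexfactory_event_py country title)

-- ===== LEMMAS AND PROOFS =====

theorem pvHit_sub (t p : String) (h : PySem.Str.startswith p "^" = false) :
    pvHit t p = PySem.Str.isIn p t := by unfold pvHit; rw [h]; simp

theorem pvHit_s0 (t : String) : pvHit t "fomc" = PySem.Str.isIn "fomc" t := pvHit_sub t _ (by decide)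
theorem pvHit_s1 (t : String) : pvHit t "federal funds" = PySem.Str.isIn "federal funds" t := pvHit_sub t _ (by decide)
theorem pvHit_s2 (t : String) : pvHit t "rate" = PySem.Str.isIn "rate" t := pvHit_sub t _ (by decide)
theorem pvHit_s3 (t : String) : pvHit t "non-farm" = PySem.Str.isIn "non-farm" t := pvHit_sub t _ (by decide)
theorem pvHit_s4 (t : String) : pvHit t "nonfarm" = PySem.Str.isIn "nonfarm" t := pvHit_sub t _ (by decide)
theorem pvHit_s5 (t : String) : pvHit t "non farm" = PySem.Str.isIn "non farm" t := pvHit_sub t _ (by decide)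
theorem pvHit_s6 (t : String) : pvHit t "cpi" = PySem.Str.isIn "cpi" t := pvHit_sub t _ (by decide)
theorem pvHit_s7 (t : String) : pvHit t "consumer price" = PySem.Str.isIn "consumer price" t := pvHit_sub t _ (by decide)
theorem pvHit_s8 (t : String) : pvHit t "employment cost index" = PySem.Str.isIn "employment cost index" t := pvHit_sub t _ (by decide)
theorem pvHit_s9 (t : String) : pvHit t "gdp" = PySem.Str.isIn "gdp" t := pvHit_sub t _ (by decide)
theorem pvHit_s10 (t : String) : pvHit t "gross domestic product" = PySem.Str.isIn "gross domestic product" t := pvHit_sub t _ (by decide)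
theorem pvHit_s11 (t : String) : pvHit t "pce" = PySem.Str.isIn "pce" t := pvHit_sub t _ (by decide)
theorem pvHit_s12 (t : String) : pvHit t "price" = PySem.Str.isIn "price" t := pvHit_sub t _ (by decide)
theorem pvHit_s13 (t : String) : pvHit t "unemployment" = PySem.Str.isIn "unemployment" t := pvHit_sub t _ (by decide)
theorem pvHit_s14 (t : String) : pvHit t "producer price" = PySem.Str.isIn "producer price" t := pvHit_sub t _ (by decide)
theorem pvHit_s15 (t : String) : pvHit t " ppi" = PySem.Str.isIn " ppi" t := pvHit_sub t _ (by decide)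
theorem pvHit_s16 (t : String) : pvHit t "industrial production" = PySem.Str.isIn "industrial production" t := pvHit_sub t _ (by decide)
theorem pvHit_s17 (t : String) : pvHit t "ecb" = PySem.Str.isIn "ecb" t := pvHit_sub t _ (by decide)
theorem pvHit_s18 (t : String) : pvHit t "interest" = PySem.Str.isIn "interest" t := pvHit_sub t _ (by decide)
theorem pvHit_s19 (t : String) : pvHit t "deposit" = PySem.Str.isIn "deposit" t := pvHit_sub t _ (by decide)
theorem pvHit_s20 (t : String) : pvHit t "refinancing" = PySem.Str.isIn "refinancing" t := pvHit_sub t _ (by decide)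
theorem pvHit_s21 (t : String) : pvHit t "monetary" = PySem.Str.isIn "monetary" t := pvHit_sub t _ (by decide)
theorem pvHit_s22 (t : String) : pvHit t "boe" = PySem.Str.isIn "boe" t := pvHit_sub t _ (by decide)
theorem pvHit_s23 (t : String) : pvHit t "bank of england" = PySem.Str.isIn "bank of england" t := pvHit_sub t _ (by decide)
theorem pvHit_s24 (t : String) : pvHit t "bank" = PySem.Str.isIn "bank" t := pvHit_sub t _ (by decide)
theorem pvHit_s25 (t : String) : pvHit t "mpc" = PySem.Str.isIn "mpc" t := pvHit_sub t _ (by decide)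
theorem pvHit_s26 (t : String) : pvHit t "rba" = PySem.Str.isIn "rba" t := pvHit_sub t _ (by decide)
theorem pvHit_s27 (t : String) : pvHit t "reserve bank of australia" = PySem.Str.isIn "reserve bank of australia" t := pvHit_sub t _ (by decide)
theorem pvHit_s28 (t : String) : pvHit t "cash rate" = PySem.Str.isIn "cash rate" t := pvHit_sub t _ (by decide)
theorem pvHit_s29 (t : String) : pvHit t "boc" = PySem.Str.isIn "boc" t := pvHit_sub t _ (by decide)
theorem pvHit_s30 (t : String) : pvHit t "bank of canada" = PySem.Str.isIn "bank of canada" t := pvHit_sub t _ (by decide)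
theorem pvHit_s31 (t : String) : pvHit t "overnight" = PySem.Str.isIn "overnight" t := pvHit_sub t _ (by decide)
theorem pvHit_s32 (t : String) : pvHit t "snb" = PySem.Str.isIn "snb" t := pvHit_sub t _ (by decide)
theorem pvHit_s33 (t : String) : pvHit t "swiss national bank" = PySem.Str.isIn "swiss national bank" t := pvHit_sub t _ (by decide)
theorem pvHit_s34 (t : String) : pvHit t "boj" = PySem.Str.isIn "boj" t := pvHit_sub t _ (by decide)
theorem pvHit_s35 (t : String) : pvHit t "bank of japan" = PySem.Str.isIn "bank of japan" t := pvHit_sub t _ (by decide)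
theorem pvHit_s36 (t : String) : pvHit t "rbi" = PySem.Str.isIn "rbi" t := pvHit_sub t _ (by decide)

theorem pvHit_ppi (t : String) : pvHit t "^ppi" = PySem.Str.startswith t "ppi" := by
  have h1 : PySem.Str.startswith "^ppi" "^" = true := by decide
  have h2 : PySem.Str.slice "^ppi" (some 1) none = "ppi" := by decide
  unfold pvHit; rw [h1, h2]; simp

theorem pvIfOrSplit {α : Type} (a b : Bool) (r x : α) :
    (if a || b then r else x) = if a then r else if b then r else x := by
  cases a <;> simp

theorem pvIfAndSplit {α : Type} (a b : Bool) (r x : α) :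
    (if a && b then r else x) = if a then (if b then r else x) else x := by
  cases a <;> simp

theorem pvMain (c t : String) :
    pvCoreA c t = pvFirstMatch t (PySem.Dict.getD pvRules c pvFallback) := by
  unfold pvCoreA
  by_cases hUSD : c = "USD"
  · subst hUSD
    have hd : PySem.Dict.getD pvRules "USD" pvFallback = pvUsdRules := by
      simp [pvRules, PySem.Dict.getD_eq_get?_getD, PySem.Dict.get?_mk_cons]
    rw [hd]
    simp only [pvUsdRules, String.reduceEq, reduceIte, pvFirstMatch, pvRuleHolds, List.all_cons, List.all_nil, List.any_cons, List.any_nil, pvHit_s0, pvHit_s1, pvHit_s2, pvHit_s3, pvHit_s4, pvHit_s5, pvHit_s6, pvHit_s7, pvHit_s8, pvHit_s9, pvHit_s10, pvHit_s11, pvHit_s12, pvHit_s13, pvHit_s14, pvHit_s15, pvHit_s16, pvHit_s17, pvHit_s18, pvHit_s19, pvHit_s20, pvHit_s21, pvHit_s22, pvHit_s23, pvHit_s24, pvHit_s25, pvHit_s26, pvHit_s27, pvHit_s28, pvHit_s29, pvHit_s30, pvHit_s31, pvHit_s32, pvHit_s33, pvHit_s34, pvHit_s35, pvHit_s36, pvHit_ppi,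 Bool.and_true, Bool.or_false, Bool.or_assoc, Bool.and_assoc, pvIfOrSplit, pvIfAndSplit, or_false, false_or, or_self, or_true, true_or]
  by_cases hEUR : c = "EUR"
  · subst hEUR
    have hd : PySem.Dict.getD pvRules "EUR" pvFallback = pvEurRules := by
      simp [pvRules, PySem.Dict.getD_eq_get?_getD, PySem.Dict.get?_mk_cons]
    rw [hd]
    simp only [pvEurRules, String.reduceEq, reduceIte, pvFirstMatch, pvRuleHolds, List.all_cons, List.all_nil, List.any_cons, List.any_nil, pvHit_s0, pvHit_s1, pvHit_s2, pvHit_s3, pvHit_s4, pvHit_s5, pvHit_s6, pvHit_s7, pvHit_s8, pvHit_s9, pvHit_s10, pvHit_s11, pvHit_s12, pvHit_s13, pvHit_s14, pvHit_s15, pvHit_s16, pvHit_s17, pvHit_s18, pvHit_s19, pvHit_s20, pvHit_s21, pvHit_s22, pvHit_s23, pvHit_s24, pvHit_s25, pvHit_s26, pvHit_s27, pvHit_s28, pvHit_s29, pvHit_s30, pvHit_s31, pvHit_s32, pvHit_s33, pvHit_s34, pvHit_s35, pvHit_s36, pvHit_ppi, Bool.and_true, Bool.or_false, Bool.or_assoc,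 Bool.and_assoc, pvIfOrSplit, pvIfAndSplit, or_false, false_or, or_self, or_true, true_or]
  by_cases hGBP : c = "GBP"
  · subst hGBP
    have hd : PySem.Dict.getD pvRules "GBP" pvFallback = pvGbpRules := by
      simp [pvRules, PySem.Dict.getD_eq_get?_getD, PySem.Dict.get?_mk_cons]
    rw [hd]
    simp only [pvGbpRules, String.reduceEq, reduceIte, pvFirstMatch, pvRuleHolds, List.all_cons, List.all_nil, List.any_cons, List.any_nil, pvHit_s0, pvHit_s1, pvHit_s2, pvHit_s3, pvHit_s4, pvHit_s5, pvHit_s6, pvHit_s7, pvHit_s8, pvHit_s9, pvHit_s10, pvHit_s11, pvHit_s12, pvHit_s13, pvHit_s14, pvHit_s15, pvHit_s16, pvHit_s17, pvHit_s18, pvHit_s19, pvHit_s20, pvHit_s21, pvHit_s22, pvHit_s23, pvHit_s24, pvHit_s25, pvHit_s26, pvHit_s27, pvHit_s28, pvHit_s29, pvHit_s30, pvHit_s31, pvHit_s32, pvHit_s33, pvHit_s34, pvHit_s35, pvHit_s36, pvHit_ppi, Bool.and_true, Bool.or_false, Bool.or_assoc, Bool.and_assoc, pvIfOrSplit, pvIfAndSplit,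 or_false, false_or, or_self, or_true, true_or]
  by_cases hUK : c = "UK"
  · subst hUK
    have hd : PySem.Dict.getD pvRules "UK" pvFallback = pvGbpRules := by
      simp [pvRules, PySem.Dict.getD_eq_get?_getD, PySem.Dict.get?_mk_cons]
    rw [hd]
    simp only [pvGbpRules, String.reduceEq, reduceIte, pvFirstMatch, pvRuleHolds, List.all_cons, List.all_nil, List.any_cons, List.any_nil, pvHit_s0, pvHit_s1, pvHit_s2, pvHit_s3, pvHit_s4, pvHit_s5, pvHit_s6, pvHit_s7, pvHit_s8, pvHit_s9, pvHit_s10, pvHit_s11, pvHit_s12, pvHit_s13, pvHit_s14, pvHit_s15, pvHit_s16, pvHit_s17, pvHit_s18, pvHit_s19, pvHit_s20, pvHit_s21, pvHit_s22, pvHit_s23, pvHit_s24, pvHit_s25, pvHit_s26, pvHit_s27, pvHit_s28, pvHit_s29, pvHit_s30, pvHit_s31, pvHit_s32, pvHit_s33, pvHit_s34, pvHit_s35, pvHit_s36, pvHit_ppi, Bool.and_true, Bool.or_false, Bool.or_assoc, Bool.and_assoc, pvIfOrSplit, pvIfAndSplit, or_false, false_or, or_self, or_true, true_or]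
  by_cases hAUD : c = "AUD"
  · subst hAUD
    have hd : PySem.Dict.getD pvRules "AUD" pvFallback = pvAudRules := by
      simp [pvRules, PySem.Dict.getD_eq_get?_getD, PySem.Dict.get?_mk_cons]
    rw [hd]
    simp only [pvAudRules, String.reduceEq, reduceIte, pvFirstMatch, pvRuleHolds, List.all_cons, List.all_nil, List.any_cons, List.any_nil, pvHit_s0, pvHit_s1, pvHit_s2, pvHit_s3, pvHit_s4, pvHit_s5, pvHit_s6, pvHit_s7, pvHit_s8, pvHit_s9, pvHit_s10, pvHit_s11, pvHit_s12, pvHit_s13, pvHit_s14, pvHit_s15, pvHit_s16, pvHit_s17, pvHit_s18, pvHit_s19, pvHit_s20, pvHit_s21, pvHit_s22, pvHit_s23, pvHit_s24, pvHit_s25, pvHit_s26, pvHit_s27, pvHit_s28, pvHit_s29, pvHit_s30, pvHit_s31, pvHit_s32, pvHit_s33, pvHit_s34, pvHit_s35, pvHit_s36, pvHit_ppi, Bool.and_true, Bool.or_false, Bool.or_assoc, Bool.and_assoc, pvIfOrSplit, pvIfAndSplit, or_false, false_or, or_self, or_true, true_or]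
  by_cases hCAD : c = "CAD"
  · subst hCAD
    have hd : PySem.Dict.getD pvRules "CAD" pvFallback = pvCadRules := by
      simp [pvRules, PySem.Dict.getD_eq_get?_getD, PySem.Dict.get?_mk_cons]
    rw [hd]
    simp only [pvCadRules, String.reduceEq, reduceIte, pvFirstMatch, pvRuleHolds, List.all_cons, List.all_nil, List.any_cons, List.any_nil, pvHit_s0, pvHit_s1, pvHit_s2, pvHit_s3, pvHit_s4, pvHit_s5, pvHit_s6, pvHit_s7, pvHit_s8, pvHit_s9, pvHit_s10, pvHit_s11, pvHit_s12, pvHit_s13, pvHit_s14, pvHit_s15, pvHit_s16, pvHit_s17, pvHit_s18, pvHit_s19, pvHit_s20, pvHit_s21, pvHit_s22, pvHit_s23, pvHit_s24, pvHit_s25, pvHit_s26, pvHit_s27, pvHit_s28, pvHit_s29, pvHit_s30, pvHit_s31, pvHit_s32, pvHit_s33, pvHit_s34, pvHit_s35, pvHit_s36, pvHit_ppi, Bool.and_true, Bool.or_false, Bool.or_assoc, Bool.and_assoc, pvIfOrSplit, pvIfAndSplit, or_false, false_or, or_self, or_true, true_or]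
  by_cases hCHF : c = "CHF"
  · subst hCHF
    have hd : PySem.Dict.getD pvRules "CHF" pvFallback = pvChfRules := by
      simp [pvRules, PySem.Dict.getD_eq_get?_getD, PySem.Dict.get?_mk_cons]
    rw [hd]
    simp only [pvChfRules, String.reduceEq, reduceIte, pvFirstMatch, pvRuleHolds, List.all_cons, List.all_nil, List.any_cons, List.any_nil, pvHit_s0, pvHit_s1, pvHit_s2, pvHit_s3, pvHit_s4, pvHit_s5, pvHit_s6, pvHit_s7, pvHit_s8, pvHit_s9, pvHit_s10, pvHit_s11, pvHit_s12, pvHit_s13, pvHit_s14, pvHit_s15, pvHit_s16, pvHit_s17, pvHit_s18, pvHit_s19, pvHit_s20, pvHit_s21, pvHit_s22, pvHit_s23, pvHit_s24, pvHit_s25, pvHit_s26, pvHit_s27, pvHit_s28, pvHit_s29, pvHit_s30, pvHit_s31, pvHit_s32, pvHit_s33, pvHit_s34, pvHit_s35, pvHit_s36, pvHit_ppi, Bool.and_true, Bool.or_false, Bool.or_assoc, Bool.and_assoc, pvIfOrSplit, pvIfAndSplit, or_false, false_or, or_self, or_true, true_or]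
  by_cases hJPY : c = "JPY"
  · subst hJPY
    have hd : PySem.Dict.getD pvRules "JPY" pvFallback = pvJpyRules := by
      simp [pvRules, PySem.Dict.getD_eq_get?_getD, PySem.Dict.get?_mk_cons]
    rw [hd]
    simp only [pvJpyRules, String.reduceEq, reduceIte, pvFirstMatch, pvRuleHolds, List.all_cons, List.all_nil, List.any_cons, List.any_nil, pvHit_s0, pvHit_s1, pvHit_s2, pvHit_s3, pvHit_s4, pvHit_s5, pvHit_s6, pvHit_s7, pvHit_s8, pvHit_s9, pvHit_s10, pvHit_s11, pvHit_s12, pvHit_s13, pvHit_s14, pvHit_s15, pvHit_s16, pvHit_s17, pvHit_s18, pvHit_s19, pvHit_s20, pvHit_s21, pvHit_s22, pvHit_s23, pvHit_s24, pvHit_s25, pvHit_s26, pvHit_s27, pvHit_s28, pvHit_s29, pvHit_s30, pvHit_s31, pvHit_s32, pvHit_s33, pvHit_s34, pvHit_s35, pvHit_s36, pvHit_ppi, Bool.and_true, Bool.or_false, Bool.or_assoc, Bool.and_assoc, pvIfOrSplit, pvIfAndSplit, or_false, false_or, or_self, or_true, true_or]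
  by_cases hINR : c = "INR"
  · subst hINR
    have hd : PySem.Dict.getD pvRules "INR" pvFallback = pvInrRules := by
      simp [pvRules, PySem.Dict.getD_eq_get?_getD, PySem.Dict.get?_mk_cons]
    rw [hd]
    simp only [pvInrRules, String.reduceEq, reduceIte, pvFirstMatch, pvRuleHolds, List.all_cons, List.all_nil, List.any_cons, List.any_nil, pvHit_s0, pvHit_s1, pvHit_s2, pvHit_s3, pvHit_s4, pvHit_s5, pvHit_s6, pvHit_s7, pvHit_s8, pvHit_s9, pvHit_s10, pvHit_s11, pvHit_s12, pvHit_s13, pvHit_s14, pvHit_s15, pvHit_s16, pvHit_s17, pvHit_s18, pvHit_s19, pvHit_s20, pvHit_s21, pvHit_s22, pvHit_s23, pvHit_s24, pvHit_s25, pvHit_s26, pvHit_s27, pvHit_s28, pvHit_s29, pvHit_s30, pvHit_s31, pvHit_s32, pvHit_s33, pvHit_s34, pvHit_s35, pvHit_s36, pvHit_ppi, Bool.and_true, Bool.or_false, Bool.or_assoc, Bool.and_assoc, pvIfOrSplit, pvIfAndSplit, or_false, false_or, or_self, or_true, true_or]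
  by_cases hIN : c = "IN"
  · subst hIN
    have hd : PySem.Dict.getD pvRules "IN" pvFallback = pvInrRules := by
      simp [pvRules, PySem.Dict.getD_eq_get?_getD, PySem.Dict.get?_mk_cons]
    rw [hd]
    simp only [pvInrRules, String.reduceEq, reduceIte, pvFirstMatch, pvRuleHolds, List.all_cons, List.all_nil, List.any_cons, List.any_nil, pvHit_s0, pvHit_s1, pvHit_s2, pvHit_s3, pvHit_s4, pvHit_s5, pvHit_s6, pvHit_s7, pvHit_s8, pvHit_s9, pvHit_s10, pvHit_s11, pvHit_s12, pvHit_s13, pvHit_s14, pvHit_s15, pvHit_s16, pvHit_s17, pvHit_s18, pvHit_s19, pvHit_s20, pvHit_s21, pvHit_s22, pvHit_s23, pvHit_s24, pvHit_s25, pvHit_s26, pvHit_s27, pvHit_s28, pvHit_s29, pvHit_s30, pvHit_s31, pvHit_s32, pvHit_s33, pvHit_s34, pvHit_s35, pvHit_s36, pvHit_ppi, Bool.and_true, Bool.or_false, Bool.or_assoc, Bool.and_assoc, pvIfOrSplit, pvIfAndSplit, or_false, false_or, or_self, or_true, true_or]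
  · have hd : PySem.Dict.getD pvRules c pvFallback = pvFallback := by
      have hmt : PySem.Dict.mk ([] : List (String × List (List (List String) × Option String))) = PySem.Dict.empty := rfl
      simp [pvRules, PySem.Dict.getD_eq_get?_getD, PySem.Dict.get?_mk_cons, hmt, Ne.symm hUSD, Ne.symm hEUR, Ne.symm hGBP, Ne.symm hUK, Ne.symm hAUD, Ne.symm hCAD, Ne.symm hCHF, Ne.symm hJPY, Ne.symm hINR, Ne.symm hIN]
    rw [hd]
    simp only [hUSD, hEUR, hGBP, hUK, hAUD, hCAD, hCHF, hJPY, hINR, hIN, pvFallback, String.reduceEq, reduceIte, pvFirstMatch, pvRuleHolds, List.all_cons, List.all_nil, List.any_cons, List.any_nil, pvHit_s0, pvHit_s1, pvHit_s2, pvHit_s3, pvHit_s4, pvHit_s5, pvHit_s6, pvHit_s7, pvHit_s8, pvHit_s9, pvHit_s10, pvHit_s11, pvHit_s12, pvHit_s13, pvHit_s14, pvHit_s15, pvHit_s16, pvHit_s17, pvHit_s18, pvHit_s19, pvHit_s20, pvHit_s21, pvHit_s22, pvHit_s23, pvHit_s24, pvHit_s25, pvHit_s26, pvHit_s27, pvHit_s28,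 pvHit_s29, pvHit_s30, pvHit_s31, pvHit_s32, pvHit_s33, pvHit_s34, pvHit_s35, pvHit_s36, pvHit_ppi, Bool.and_true, Bool.or_false, Bool.or_assoc, Bool.and_assoc, pvIfOrSplit, pvIfAndSplit, or_false, false_or, or_self, or_true, true_or]

-- ===== VERDICT (by name: the statement is the Claim_ definition above) =====
theorem match_forexfactory_event_py_spec : Claim_equal_match_forexfactory_event_py := by
  intro country title _
  unfold Spec_match_forexfactory_event_py match_forexfactory_event_py match_forexfactory_event_py_alt
  exact pvMain _ _
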